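-- pv_equiv track=rewrite | github.com/kkg5499/ImprovedParChoice | style_transfer/paraphrases.py | comma_combinations
-- ===== SOURCE A (Python) =====
-- def comma_combinations(sent):
--     parts = []
--     comma_indices = [i for i,char in enumerate(sent) if char == ',']
--     prev = 0
--     for i in comma_indices:
--         parts.append(sent[prev:i])
--         prev = i+1
--     parts.append(sent[prev:])
--     comma_comb = [parts[0]]
--     if len(parts) > 1:
--         for part in parts[1:]:
--             comma_comb_new = []
--             for s in comma_comb:
--                 comma_comb_new.append(s.strip() + ' ' + part.strip())
--                 comma_comb_new.append(s.strip() + ' , ' + part.strip())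
--             comma_comb = comma_comb_new
--     return comma_comb
-- ===== SOURCE B (Python) =====
-- def comma_combinations(sent):
--     parts = sent.split(',')
--
--     def build(acc, rest):
--         if not rest:
--             return [acc]
--         head = rest[0].strip()
--         return (build(acc.strip() + ' ' + head, rest[1:]) +
--                 build(acc.strip() + ' , ' + head, rest[1:]))
--
--     return build(parts[0], parts[1:])
-- ===== Notes on version B (the rewrite author's own statement) =====
-- stated objective: simpler
-- what changed: Splitting is done with the built-in str.split instead of a manual enumerate/index/slice loop, and the combinations are produced by depth-first recursion over the remaining parts instead of A's breadth-first list-doubling loop.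
import Mathlib
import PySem

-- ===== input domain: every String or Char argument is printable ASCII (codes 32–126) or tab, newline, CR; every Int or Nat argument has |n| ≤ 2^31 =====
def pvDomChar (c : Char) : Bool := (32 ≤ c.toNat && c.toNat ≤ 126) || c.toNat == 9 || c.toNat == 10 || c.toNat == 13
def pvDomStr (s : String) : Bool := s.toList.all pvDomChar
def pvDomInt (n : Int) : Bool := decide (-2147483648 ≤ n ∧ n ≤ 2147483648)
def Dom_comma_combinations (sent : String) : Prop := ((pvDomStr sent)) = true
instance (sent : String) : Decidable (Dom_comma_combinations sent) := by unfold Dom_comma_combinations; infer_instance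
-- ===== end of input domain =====

-- B replaces A's index/slice splitting by the built-in str.split and A's breadth-first
-- list-doubling by a depth-first recursion over the remaining parts (simpler).

-- ===== PORT A =====
-- [i for i,char in enumerate(sent) if char == ',']
def cc_idxs (cs : List Char) : List Int :=
  ((PySem.List.enumerate cs 0).filter (fun p => p.2 == ',')).map (·.1)

-- one iteration of "for i in comma_indices: parts.append(sent[prev:i]); prev = i+1"
def cc_step (cs : List Char) (st : List (List Char) × Int) (i : Int) : List (List Char) × Int :=
  (st.1 ++ [PySem.List.slice cs (some st.2) (some i)], i + 1)

-- the whole parts-building phase of A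
def cc_partsA (cs : List Char) : List (List Char) :=
  let st := (cc_idxs cs).foldl (cc_step cs) ([], 0)
  st.1 ++ [PySem.List.slice cs (some st.2) none]

-- A's inner loop body: comma_comb_new.append(... ' ' ...); comma_comb_new.append(... ' , ' ...)
def cc_inner (part : List Char) (newl : List (List Char)) (s : List Char) : List (List Char) :=
  newl ++ [PySem.Chars.strip s ++ [' '] ++ PySem.Chars.strip part,
           PySem.Chars.strip s ++ [' ', ',', ' '] ++ PySem.Chars.strip part]

def comma_combinations (sent : String) : List String :=
  let parts := cc_partsA sent.toList
  let comb0 := [PySem.List.pyGetD parts 0 []]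
  let comb := if parts.length > 1 then
      (PySem.List.slice parts (some 1) none).foldl
        (fun comb part => comb.foldl (cc_inner part) []) comb0
    else comb0
  comb.map String.ofList

-- ===== PORT B =====
-- B's recursive helper build(acc, rest)
def cc_build (acc : List Char) (rest : List (List Char)) : List (List Char) :=
  match rest with
  | [] => [acc]
  | r :: rs =>
      cc_build (PySem.Chars.strip acc ++ [' '] ++ PySem.Chars.strip r) rs ++
      cc_build (PySem.Chars.strip acc ++ [' ', ',', ' '] ++ PySem.Chars.strip r) rs

def comma_combinations_alt (sent : String) : List String :=
  let parts := PySem.Chars.splitOn sent.toList [',']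
  (cc_build (parts.headD []) parts.tail).map String.ofList

-- ===== PRECONDITION & SPEC =====
def Spec_comma_combinations (sent : String) (out : List String) : Prop := out = comma_combinations_alt sent
instance (sent : String) (out : List String) : Decidable (Spec_comma_combinations sent out) := by unfold Spec_comma_combinations; infer_instance

-- ===== CLAIM (what is proved, stated in full; the proofs are below) =====
def Claim_equal_comma_combinations : Prop := ∀ (sent : String), Dom_comma_combinations sent → Spec_comma_combinations sent (comma_combinations sent)

-- ===== LEMMAS AND PROOFS =====

-- structural comma-splitting spec both parts phases are proved equal to
def ccSplit : List Char → List (List Char)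
  | [] => [[]]
  | c :: rest =>
      if c = ',' then [] :: ccSplit rest
      else match ccSplit rest with
        | [] => [[c]]
        | h :: t => (c :: h) :: t

theorem ccSplit_ne_nil (cs : List Char) : ccSplit cs ≠ [] := by
  induction cs with
  | nil => simp [ccSplit]
  | cons c rest ih =>
    simp only [ccSplit]
    split
    · simp
    · cases h : ccSplit rest <;> simp

theorem cc_go_eq (fuel : Nat) : ∀ (l cur : List Char) (acc : List (List Char)),
    l.length < fuel →
    PySem.Chars.splitOn.go [','] fuel l cur acc
      = acc.reverse ++ (match ccSplit l with
          | [] => []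
          | h :: t => (cur.reverse ++ h) :: t) := by
  induction fuel with
  | zero => intro l cur acc h; omega
  | succ f ih =>
    intro l cur acc h
    cases l with
    | nil => simp [PySem.Chars.splitOn.go, ccSplit]
    | cons c rest =>
      by_cases hc : c = ','
      · subst hc
        have hpre : List.isPrefixOf [','] (',' :: rest) = true := by
          simp [List.isPrefixOf]
        rw [PySem.Chars.splitOn.go, if_pos hpre]
        simp only [List.length_cons] at h
        rw [ih _ _ _ (by simpa using Nat.lt_of_succ_lt_succ h)]
        rcases hne : ccSplit rest with _ | ⟨h0, t0⟩
        · exact absurd hne (ccSplit_ne_nil rest)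
        · simp [ccSplit, hne]
      · have hpre : List.isPrefixOf [','] (c :: rest) = false := by
          simp [List.isPrefixOf]; exact fun hh => absurd hh.symm hc
        rw [PySem.Chars.splitOn.go, if_neg (by simp [hpre])]
        simp only [List.length_cons] at h
        rw [ih _ _ _ (Nat.lt_of_succ_lt_succ h)]
        rcases hne : ccSplit rest with _ | ⟨h0, t0⟩
        · exact absurd hne (ccSplit_ne_nil rest)
        · simp [ccSplit, hne, hc]

theorem splitOn_comma (cs : List Char) :
    PySem.Chars.splitOn cs [','] = ccSplit cs := by
  rw [PySem.Chars.splitOn, cc_go_eq (cs.length + 1) cs [] [] (by omega)]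
  rcases hne : ccSplit cs with _ | ⟨h0, t0⟩
  · exact absurd hne (ccSplit_ne_nil cs)
  · simp

-- enumerate with shifted start
theorem enumerate_shift {α : Type} (xs : List α) : ∀ (s : Int),
    PySem.List.enumerate xs (s + 1) = (PySem.List.enumerate xs s).map (fun p => (p.1 + 1, p.2)) := by
  induction xs with
  | nil => intro s; simp [PySem.List.enumerate_nil]
  | cons x xs ih =>
    intro s
    rw [PySem.List.enumerate_cons, PySem.List.enumerate_cons, ih (s + 1)]
    simp

theorem cc_idxs_cons (c : Char) (cs : List Char) :
    cc_idxs (c :: cs)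
      = (if c = ',' then [(0 : Int)] else []) ++ (cc_idxs cs).map (· + 1) := by
  unfold cc_idxs
  rw [PySem.List.enumerate_cons, enumerate_shift cs 0]
  by_cases hc : c = ','
  · subst hc
    simp [List.filter_map, List.map_map, Function.comp_def]
  · simp [List.filter_map, List.map_map, Function.comp_def, hc]

-- the fold's accumulator is a pure prefix; its second component ignores the accumulator
theorem cc_fold_acc (cs : List Char) : ∀ (is : List Int) (acc : List (List Char)) (p : Int),
    is.foldl (cc_step cs) (acc, p)
      = (acc ++ (is.foldl (cc_step cs) ([], p)).1, (is.foldl (cc_step cs) ([], p)).2) := by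
  intro is
  induction is with
  | nil => intro acc p; simp
  | cons i is ih =>
    intro acc p
    simp only [List.foldl_cons]
    rw [show cc_step cs (acc, p) i
          = (acc ++ [PySem.List.slice cs (some p) (some i)], i + 1) from rfl,
        show cc_step cs ([], p) i
          = ([] ++ [PySem.List.slice cs (some p) (some i)], i + 1) from rfl]
    rw [ih (acc ++ [PySem.List.slice cs (some p) (some i)]) (i + 1),
        ih ([] ++ [PySem.List.slice cs (some p) (some i)]) (i + 1)]
    simp

theorem cc_idxs_nonneg (cs : List Char) : ∀ i ∈ cc_idxs cs, 0 ≤ i := by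
  intro i hi
  unfold cc_idxs at hi
  simp only [List.mem_map, List.mem_filter] at hi
  obtain ⟨p, ⟨hp, -⟩, rfl⟩ := hi
  rw [PySem.List.mem_enumerate_iff] at hp
  obtain ⟨k, hk, rfl⟩ := hp
  simp

-- slicing c :: cs at shifted nonnegative bounds
theorem slice_cons_shift (c : Char) (cs : List Char) (a b : Int) (ha : 0 ≤ a) (hb : 0 ≤ b) :
    PySem.List.slice (c :: cs) (some (a + 1)) (some (b + 1)) = PySem.List.slice cs (some a) (some b) := by
  rw [PySem.List.slice_toNat _ (by omega) (by omega), PySem.List.slice_toNat _ ha hb]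
  have h1 : (a + 1).toNat = a.toNat + 1 := by omega
  have h2 : (b + 1).toNat = b.toNat + 1 := by omega
  simp [h1, h2]

theorem slice_from_cons_shift (c : Char) (cs : List Char) (a : Int) (ha : 0 ≤ a) :
    PySem.List.slice (c :: cs) (some (a + 1)) none = PySem.List.slice cs (some a) none := by
  rw [PySem.List.slice_from _ (by omega), PySem.List.slice_from _ ha]
  have h1 : (a + 1).toNat = a.toNat + 1 := by omega
  simp [h1]

theorem cc_fold_snd_nonneg (cs : List Char) : ∀ (is : List Int) (acc : List (List Char)) (p : Int),
    0 ≤ p → (∀ i ∈ is, 0 ≤ i) → 0 ≤ (is.foldl (cc_step cs) (acc, p)).2 := by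
  intro is
  induction is with
  | nil => intro acc p hp _; simpa using hp
  | cons i is ih =>
    intro acc p hp hnn
    simp only [List.foldl_cons]
    exact ih _ (i + 1) (by have := hnn i (by simp); omega) (fun j hj => hnn j (by simp [hj]))

-- folding shifted indices over c :: cs equals folding the original indices over cs
theorem cc_fold_shift (c : Char) (cs : List Char) :
    ∀ (is : List Int) (acc : List (List Char)) (p : Int), 0 ≤ p → (∀ i ∈ is, 0 ≤ i) →
    (is.map (· + 1)).foldl (cc_step (c :: cs)) (acc, p + 1)
      = ((is.foldl (cc_step cs) (acc, p)).1, (is.foldl (cc_step cs) (acc, p)).2 + 1) := by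
  intro is
  induction is with
  | nil => intro acc p hp _; simp
  | cons i is ih =>
    intro acc p hp hnn
    have hi : 0 ≤ i := hnn i (by simp)
    simp only [List.map_cons, List.foldl_cons]
    rw [show cc_step (c :: cs) (acc, p + 1) (i + 1)
          = (acc ++ [PySem.List.slice (c :: cs) (some (p + 1)) (some (i + 1))], (i + 1) + 1) from rfl,
        slice_cons_shift c cs p i hp hi]
    exact ih _ (i + 1) (by omega) (fun j hj => hnn j (by simp [hj]))

theorem cc_partsA_eq (cs : List Char) : cc_partsA cs = ccSplit cs := by
  induction cs with
  | nil =>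
    simp [cc_partsA, cc_idxs, ccSplit, PySem.List.enumerate_nil, PySem.List.slice_from _ (by omega : (0:Int) ≤ 0)]
  | cons c rest ih =>
    unfold cc_partsA
    by_cases hc : c = ','
    · subst hc
      have hidx2 : cc_idxs (',' :: rest) = (0 : Int) :: (cc_idxs rest).map (· + 1) := by
        rw [cc_idxs_cons]; simp
      rw [hidx2]
      simp only [List.foldl_cons]
      rw [show cc_step (',' :: rest) ([], 0) 0
            = ([PySem.List.slice (',' :: rest) (some 0) (some 0)], (0 : Int) + 1) from rfl]
      have h00 : PySem.List.slice (',' :: rest) (some (0 : Int)) (some (0 : Int)) = [] := by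
        rw [PySem.List.slice_toNat _ le_rfl le_rfl]; simp
      rw [h00, cc_fold_shift ',' rest (cc_idxs rest) [[]] 0 le_rfl (cc_idxs_nonneg rest),
          cc_fold_acc rest (cc_idxs rest) [[]] 0,
          slice_from_cons_shift ',' rest _ (cc_fold_snd_nonneg rest _ [] 0 le_rfl (cc_idxs_nonneg rest))]
      rw [show ccSplit (',' :: rest) = [] :: ccSplit rest by simp [ccSplit], ← ih]
      unfold cc_partsA
      simp
    · have hidx2 : cc_idxs (c :: rest) = (cc_idxs rest).map (· + 1) := by
        rw [cc_idxs_cons]; simp [hc]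
      rw [hidx2]
      rcases hidx : cc_idxs rest with _ | ⟨j, js⟩
      · -- no comma anywhere: parts = [whole string]
        have hrest : ccSplit rest = [rest] := by
          rw [← ih]
          unfold cc_partsA
          rw [hidx]
          simp [PySem.List.slice_from _ (le_refl (0 : Int))]
        simp only [List.map_nil, List.foldl_nil]
        rw [PySem.List.slice_from _ (le_refl (0 : Int))]
        rw [show ccSplit (c :: rest) = (match ccSplit rest with
              | [] => [[c]] | h :: t => (c :: h) :: t) by simp [ccSplit, hc]]
        rw [hrest]
        simp
      · have hj : 0 ≤ j := cc_idxs_nonneg rest j (by simp [hidx])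
        have hjs : ∀ i ∈ js, 0 ≤ i := fun i hi => cc_idxs_nonneg rest i (by simp [hidx, hi])
        simp only [List.map_cons, List.foldl_cons]
        rw [show cc_step (c :: rest) ([], 0) (j + 1)
              = ([PySem.List.slice (c :: rest) (some 0) (some (j + 1))], (j + 1) + 1) from rfl]
        have hsl0 : PySem.List.slice (c :: rest) (some (0 : Int)) (some (j + 1))
            = c :: PySem.List.slice rest (some 0) (some j) := by
          rw [PySem.List.slice_toNat _ le_rfl (by omega), PySem.List.slice_toNat _ le_rfl hj]
          have h2 : (j + 1).toNat = j.toNat + 1 := by omega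
          simp [h2]
        rw [hsl0,
            cc_fold_shift c rest js _ (j + 1) (by omega) hjs,
            cc_fold_acc rest js _ (j + 1),
            slice_from_cons_shift c rest _ (cc_fold_snd_nonneg rest js [] (j + 1) (by omega) hjs)]
        rw [show ccSplit (c :: rest) = (match ccSplit rest with
              | [] => [[c]] | h :: t => (c :: h) :: t) by simp [ccSplit, hc]]
        rw [← ih]
        unfold cc_partsA
        rw [hidx]
        simp only [List.foldl_cons]
        rw [show cc_step rest ([], 0) j
              = ([PySem.List.slice rest (some 0) (some j)], j + 1) from rfl,
            cc_fold_acc rest js [PySem.List.slice rest (some 0) (some j)] (j + 1)]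
        simp

-- A's inner loop is a flatMap
theorem cc_inner_eq_flatMap (part : List Char) (comb : List (List Char)) :
    comb.foldl (cc_inner part) []
      = comb.flatMap (fun s =>
          [PySem.Chars.strip s ++ [' '] ++ PySem.Chars.strip part,
           PySem.Chars.strip s ++ [' ', ',', ' '] ++ PySem.Chars.strip part]) := by
  exact (PySem.List.foldl_append_eq_flatMap
    (g := fun s => [PySem.Chars.strip s ++ [' '] ++ PySem.Chars.strip part,
                    PySem.Chars.strip s ++ [' ', ',', ' '] ++ PySem.Chars.strip part])
    comb []).trans (List.nil_append _)

-- A's breadth-first doubling equals B's depth-first recursion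
theorem cc_bfs_eq_build : ∀ (rest : List (List Char)) (L : List (List Char)),
    rest.foldl (fun comb part => comb.foldl (cc_inner part) []) L
      = L.flatMap (fun a => cc_build a rest) := by
  intro rest
  induction rest with
  | nil => intro L; simp [cc_build]
  | cons r rs ih =>
    intro L
    simp only [List.foldl_cons]
    rw [cc_inner_eq_flatMap, ih]
    rw [List.flatMap_assoc]
    simp [cc_build]

-- ===== VERDICT (by name: the statement is the Claim_ definition above) =====
theorem comma_combinations_spec : Claim_equal_comma_combinations := by
  intro sent _
  unfold Spec_comma_combinations comma_combinations comma_combinations_alt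
  rw [splitOn_comma, ← cc_partsA_eq]
  rcases hne : cc_partsA sent.toList with _ | ⟨h, t⟩
  · rw [cc_partsA_eq] at hne; exact absurd hne (ccSplit_ne_nil sent.toList)
  · simp only [List.headD_cons, List.tail_cons,
      PySem.List.pyGetD_zero, List.getD_cons_zero, PySem.List.slice_from_one]
    rcases t with _ | ⟨t0, ts⟩
    · simp [cc_build]
    · simp only [List.length_cons]
      rw [if_pos (by omega)]
      rw [cc_bfs_eq_build]
      simp
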